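-- pv_equiv track=rewrite | github.com/BDACOIN/discord.bot | Jack-o-Lantern/Jack_o_Lantern.py | get_symbol_display_cards
-- ===== SOURCE A (Python) =====
-- def get_symbol_display_cards(cards):
--     midifiled_cards = []
--     for c in cards:
--         c = c.replace("WJB", "Jo(B)")
--         c = c.replace("WJR", "Jo(R)")
--         c = c.replace("S", "♤")
--         c = c.replace("D", "♢")
--         c = c.replace("H", "♡")
--         c = c.replace("C", "♧")
--         c = c.replace("T", "10")
--         midifiled_cards.append(c)
--
--     return midifiled_cards
-- ===== SOURCE B (Python) =====
-- _DISPLAY = {"WJB": "Jo(B)", "WJR": "Jo(R)",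
--             "S": "\u2664", "D": "\u2662", "H": "\u2661", "C": "\u2667", "T": "10"}
--
-- def get_symbol_display_cards(cards):
--     # one table-driven left-to-right scan per card instead of seven replace passes
--     def convert(c):
--         out = []
--         i = 0
--         n = len(c)
--         while i < n:
--             tri = c[i:i + 3]
--             if tri in ("WJB", "WJR"):
--                 out.append(_DISPLAY[tri])
--                 i += 3
--             else:
--                 out.append(_DISPLAY.get(c[i], c[i]))
--                 i += 1
--         return "".join(out)
--     return [convert(c) for c in cards]
-- ===== Notes on version B (the rewrite author's own statement) =====
-- stated objective: idiomatic
-- what changed: A makes seven sequential full-string .replace() passes per card; B builds one token->display table and converts each card in a single explicit left-to-right scan that matches the 3-char joker tokens first and otherwise maps the single character through the table.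
import Mathlib
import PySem

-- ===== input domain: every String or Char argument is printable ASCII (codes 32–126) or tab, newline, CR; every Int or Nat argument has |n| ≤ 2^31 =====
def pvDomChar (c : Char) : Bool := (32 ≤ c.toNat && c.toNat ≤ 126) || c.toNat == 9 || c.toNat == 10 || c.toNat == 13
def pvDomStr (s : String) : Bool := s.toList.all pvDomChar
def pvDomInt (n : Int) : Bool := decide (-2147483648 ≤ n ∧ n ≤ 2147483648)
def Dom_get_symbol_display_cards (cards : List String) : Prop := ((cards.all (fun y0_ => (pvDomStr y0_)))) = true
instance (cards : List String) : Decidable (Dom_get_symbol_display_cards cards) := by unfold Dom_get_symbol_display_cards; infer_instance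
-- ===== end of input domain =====

-- B replaces A's seven sequential full-string replace passes by one table-driven
-- left-to-right scan per card (objective: idiomatic single pass; same return value).

-- ===== PORT A =====
def get_symbol_display_cards (cards : List String) : List String :=
  cards.foldl (fun midifiled_cards c =>
    let c1 := PySem.Str.replace c "WJB" "Jo(B)"
    let c2 := PySem.Str.replace c1 "WJR" "Jo(R)"
    let c3 := PySem.Str.replace c2 "S" "♤"
    let c4 := PySem.Str.replace c3 "D" "♢"
    let c5 := PySem.Str.replace c4 "H" "♡"
    let c6 := PySem.Str.replace c5 "C" "♧"
    let c7 := PySem.Str.replace c6 "T" "10"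
    midifiled_cards ++ [c7]) []

-- ===== PORT B =====
-- table lookup for a single character (Source B: _DISPLAY.get(c[i], c[i]))
def altCharMap (ch : Char) : List Char :=
  if ch = 'S' then "♤".toList
  else if ch = 'D' then "♢".toList
  else if ch = 'H' then "♡".toList
  else if ch = 'C' then "♧".toList
  else if ch = 'T' then "10".toList
  else [ch]

-- Source B's while loop over i: try the 3-char tokens first, else one char
def altConvert : List Char → List Char
  | 'W' :: 'J' :: 'B' :: rest => "Jo(B)".toList ++ altConvert rest
  | 'W' :: 'J' :: 'R' :: rest => "Jo(R)".toList ++ altConvert rest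
  | c :: rest => altCharMap c ++ altConvert rest
  | [] => []

def get_symbol_display_cards_alt (cards : List String) : List String :=
  cards.map (fun c => String.ofList (altConvert c.toList))

-- ===== PRECONDITION & SPEC =====
def Spec_get_symbol_display_cards (cards : List String) (out : List String) : Prop := out = get_symbol_display_cards_alt cards
instance (cards : List String) (out : List String) : Decidable (Spec_get_symbol_display_cards cards out) := by unfold Spec_get_symbol_display_cards; infer_instance

-- ===== CLAIM (what is proved, stated in full; the proofs are below) =====
def Claim_equal_get_symbol_display_cards : Prop := ∀ (cards : List String), Dom_get_symbol_display_cards cards → Spec_get_symbol_display_cards cards (get_symbol_display_cards cards)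

-- ===== LEMMAS AND PROOFS =====

def rep (old new : List Char) : List Char → List Char
  | [] => []
  | c :: t =>
    if old.isPrefixOf (c :: t) then new ++ rep old new (List.drop (old.length - 1) t)
    else c :: rep old new t
termination_by l => l.length
decreasing_by all_goals simp

theorem rep_go (old new : List Char) (hold : old ≠ []) :
    ∀ fuel l acc, l.length ≤ fuel →
      PySem.Chars.replace.go old new fuel l acc = acc.reverse ++ rep old new l := by
  intro fuel
  induction fuel with
  | zero =>
    intro l acc h
    have hl : l = [] := List.eq_nil_of_length_eq_zero (by omega)
    subst hl
    rw [PySem.Chars.replace.go]; simp [rep]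
  | succ n ih =>
    intro l acc h
    cases l with
    | nil =>
      rw [PySem.Chars.replace.go]
      all_goals simp [rep]
    | cons c t =>
      rw [PySem.Chars.replace.go]
      by_cases hp : old.isPrefixOf (c :: t)
      · simp only [hp, if_true]
        have hlen : 1 ≤ old.length := by cases old <;> simp_all
        have : (List.drop old.length (c :: t)).length ≤ n := by
          rw [List.length_drop]
          simp only [List.length_cons]
          simp at h
          omega
        rw [ih _ _ this]
        have hdrop : List.drop old.length (c :: t) = List.drop (old.length - 1) t := by
          cases old with
          | nil => simp_all
          | cons a as => simp
        rw [rep, if_pos hp, hdrop]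
        simp
      · simp only [hp, Bool.false_eq_true, if_false]
        rw [ih t (c :: acc) (by simp at h; omega)]
        rw [rep, if_neg hp]
        simp

theorem replace_eq_rep (old new : List Char) (hold : old ≠ []) (s : List Char) :
    PySem.Chars.replace s old new = rep old new s := by
  rw [PySem.Chars.replace]
  simp [List.isEmpty_eq_false_iff.mpr hold, rep_go old new hold s.length s [] le_rfl]

theorem rep_single (o : Char) (n : List Char) (cs : List Char) :
    rep [o] n cs = cs.flatMap (fun c => if c = o then n else [c]) := by
  induction cs with
  | nil => simp [rep]
  | cons c t ih =>
    rw [rep]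
    by_cases h : c = o
    · subst h; simp [List.isPrefixOf, ih]
    · simp [List.isPrefixOf, Ne.symm h, h, ih]

theorem rep2_append (p x : List Char) (hp : 'W' ∉ p) :
    rep "WJR".toList "Jo(R)".toList (p ++ x) = p ++ rep "WJR".toList "Jo(R)".toList x := by
  induction p with
  | nil => simp
  | cons a p ih =>
    have ha : a ≠ 'W' := by intro h; exact hp (by simp [h])
    rw [List.cons_append, rep, if_neg (by simp [List.isPrefixOf]; intro h; exact absurd h.symm ha)]
    rw [ih (by intro h; exact hp (List.mem_cons_of_mem _ h))]
    rfl


theorem rep1_headR (u : List Char) :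
    (rep "WJB".toList "Jo(B)".toList u).head? = some 'R' ↔ u.head? = some 'R' := by
  cases u with
  | nil => simp [rep]
  | cons c t =>
    rw [rep]
    by_cases h : ("WJB".toList).isPrefixOf (c :: t)
    · rw [if_pos h]
      have hc : c = 'W' := by
        revert h; simp [List.isPrefixOf]; intro h _; exact h.symm
      subst hc
      simp
    · rw [if_neg h]
      simp

theorem prefR (x : List Char) : ['R'].isPrefixOf x = (x.head? == some 'R') := by
  cases x with
  | nil => simp [List.isPrefixOf]
  | cons a y => simp [List.isPrefixOf, eq_comm]

theorem rep1_JR (u : List Char) :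
    ['J','R'].isPrefixOf (rep "WJB".toList "Jo(B)".toList u) = ['J','R'].isPrefixOf u := by
  cases u with
  | nil => simp [rep]
  | cons c t =>
    rw [rep]
    by_cases h : ("WJB".toList).isPrefixOf (c :: t)
    · rw [if_pos h]
      have hc : c = 'W' := by
        revert h; simp [List.isPrefixOf]; intro h _; exact h.symm
      subst hc
      simp [List.isPrefixOf]
    · rw [if_neg h]
      simp only [List.isPrefixOf]
      congr 1
      rw [prefR, prefR]
      have h1 := rep1_headR t
      cases e1 : (rep "WJB".toList "Jo(B)".toList t).head? <;> cases e2 : t.head? <;>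
        rw [e1, e2] at h1 <;> simp_all

theorem chain5_flat (cs : List Char) :
    rep ['T'] "10".toList (rep ['C'] "♧".toList (rep ['H'] "♡".toList
      (rep ['D'] "♢".toList (rep ['S'] "♤".toList cs)))) = cs.flatMap altCharMap := by
  simp only [rep_single, List.flatMap_assoc]
  apply List.flatMap_congr
  intro c _
  by_cases h1 : c = 'S'
  · subst h1; decide
  by_cases h2 : c = 'D'
  · subst h2; decide
  by_cases h3 : c = 'H'
  · subst h3; decide
  by_cases h4 : c = 'C'
  · subst h4; decide
  by_cases h5 : c = 'T'
  · subst h5; decide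
  simp [h1, h2, h3, h4, h5, altCharMap]

theorem main_chars (cs : List Char) :
    (rep "WJR".toList "Jo(R)".toList (rep "WJB".toList "Jo(B)".toList cs)).flatMap altCharMap
      = altConvert cs := by
  induction cs using altConvert.induct with
  | case1 rest ih =>
    rw [rep, if_pos (by simp [List.isPrefixOf])]
    rw [show (List.drop ("WJB".toList.length - 1) ('J' :: 'B' :: rest)) = rest by simp]
    rw [rep2_append _ _ (by decide)]
    simp only [List.flatMap_append, ih]
    rfl
  | case2 rest ih =>
    have e1 : rep "WJB".toList "Jo(B)".toList ('W'::'J'::'R'::rest)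
        = 'W'::'J'::'R':: rep "WJB".toList "Jo(B)".toList rest := by
      rw [rep, if_neg (by simp [List.isPrefixOf])]
      rw [rep, if_neg (by simp [List.isPrefixOf])]
      rw [rep, if_neg (by simp [List.isPrefixOf])]
    rw [e1]
    rw [rep, if_pos (by simp [List.isPrefixOf])]
    rw [show (List.drop ("WJR".toList.length - 1) ('J' :: 'R' :: rep "WJB".toList "Jo(B)".toList rest)) = rep "WJB".toList "Jo(B)".toList rest by simp]
    simp only [List.flatMap_append, ih]
    rfl
  | case3 c rest h1 h2 ih =>
    have hA : ¬ ("WJB".toList).isPrefixOf (c :: rest) = true := by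
      simp only [List.isPrefixOf_iff_prefix]
      intro h
      rcases h with ⟨t, ht⟩
      exact h1 t (by cases ht; rfl) (by cases ht; rfl)
    have e1 : rep "WJB".toList "Jo(B)".toList (c :: rest)
        = c :: rep "WJB".toList "Jo(B)".toList rest := by
      rw [rep, if_neg hA]
    have hB : ¬ ("WJR".toList).isPrefixOf (c :: rep "WJB".toList "Jo(B)".toList rest) = true := by
      intro h
      have hc : c = 'W' := by
        revert h; simp [List.isPrefixOf]; intro h _; exact h.symm
      have hjr : ['J','R'].isPrefixOf (rep "WJB".toList "Jo(B)".toList rest) = true := by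
        revert h; simp [List.isPrefixOf]
      rw [rep1_JR] at hjr
      rcases List.isPrefixOf_iff_prefix.mp hjr with ⟨t, ht⟩
      exact h2 t hc (by cases ht; rfl)
    have e2 : rep "WJR".toList "Jo(R)".toList (c :: rep "WJB".toList "Jo(B)".toList rest)
        = c :: rep "WJR".toList "Jo(R)".toList (rep "WJB".toList "Jo(B)".toList rest) := by
      rw [rep, if_neg hB]
    rw [e1, e2, altConvert.eq_3 _ _ h1 h2]
    simp only [List.flatMap_cons, ih]
  | case4 => simp [rep, altConvert]

theorem per_card (c : String) :
    PySem.Str.replace (PySem.Str.replace (PySem.Str.replace (PySem.Str.replace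
      (PySem.Str.replace (PySem.Str.replace (PySem.Str.replace c "WJB" "Jo(B)")
      "WJR" "Jo(R)") "S" "♤") "D" "♢") "H" "♡") "C" "♧") "T" "10"
      = String.ofList (altConvert c.toList) := by
  have h : ∀ s : String, ∀ o n : String, o.toList ≠ [] →
      (PySem.Str.replace s o n).toList = rep o.toList n.toList s.toList := by
    intro s o n ho
    rw [PySem.Str.toList_replace, replace_eq_rep _ _ ho]
  have key : (PySem.Str.replace (PySem.Str.replace (PySem.Str.replace (PySem.Str.replace
      (PySem.Str.replace (PySem.Str.replace (PySem.Str.replace c "WJB" "Jo(B)")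
      "WJR" "Jo(R)") "S" "♤") "D" "♢") "H" "♡") "C" "♧") "T" "10").toList
      = altConvert c.toList := by
    rw [h _ _ _ (by decide), h _ _ _ (by decide), h _ _ _ (by decide), h _ _ _ (by decide),
        h _ _ _ (by decide), h _ _ _ (by decide), h _ _ _ (by decide)]
    rw [show ("S" : String).toList = ['S'] from rfl, show ("D" : String).toList = ['D'] from rfl,
        show ("H" : String).toList = ['H'] from rfl, show ("C" : String).toList = ['C'] from rfl,
        show ("T" : String).toList = ['T'] from rfl]
    rw [chain5_flat, main_chars]
  rw [← key, String.ofList_toList]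

-- ===== VERDICT (by name: the statement is the Claim_ definition above) =====
theorem get_symbol_display_cards_spec : Claim_equal_get_symbol_display_cards := by
  intro cards _
  unfold Spec_get_symbol_display_cards get_symbol_display_cards get_symbol_display_cards_alt
  rw [PySem.List.foldl_append_singleton_eq_map]
  exact List.map_congr_left (fun c _ => per_card c)
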